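-- pv_equiv track=rewrite | github.com/Astrocook1/CS50P | test_plates/plates.py | check
-- ===== SOURCE A (Python) =====
-- def check(s):
--     count = 0
--     for i in range(2,len(s)):
--         if not(s[i].isalnum()):
--             return False
--         else:
--             if i < (len(s) - 1):
--                  if s[i].isdigit():
--                     count += 1
--                     if s[i] == "0" and count == 1:
--                         return False
--                     elif (check_for_mid_alphabets(s[i+1:(len(s))])):
--                         return False
--
--     return True
--
-- def check_for_mid_alphabets(t):
--     for i in range(len(t)):
--         if t[i].isalpha():
--             return True
-- ===== SOURCE B (Python) =====
-- def check(s):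
--     # One pass: every char from index 2 must be alphanumeric; at the first digit
--     # found before the last position, fail if it is '0' or if any letter follows it.
--     if not all(c.isalnum() for c in s[2:]):
--         return False
--     n = len(s)
--     for i in range(2, n - 1):
--         if s[i].isdigit():
--             if s[i] == "0":
--                 return False
--             return not any(c.isalpha() for c in s[i + 1:])
--     return True
-- ===== Notes on version B (the rewrite author's own statement) =====
-- stated objective: alternative
-- what changed: B replaces A's per-digit suffix scan (check_for_mid_alphabets on a fresh slice at every digit) with a single alnum pass plus one stop at the first pre-last digit, where one suffix scan for letters decides the result; worst-case O(n) vs A's O(n^2), though a timing run's inputs did not confirm a consistent speed-up.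
import Mathlib
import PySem

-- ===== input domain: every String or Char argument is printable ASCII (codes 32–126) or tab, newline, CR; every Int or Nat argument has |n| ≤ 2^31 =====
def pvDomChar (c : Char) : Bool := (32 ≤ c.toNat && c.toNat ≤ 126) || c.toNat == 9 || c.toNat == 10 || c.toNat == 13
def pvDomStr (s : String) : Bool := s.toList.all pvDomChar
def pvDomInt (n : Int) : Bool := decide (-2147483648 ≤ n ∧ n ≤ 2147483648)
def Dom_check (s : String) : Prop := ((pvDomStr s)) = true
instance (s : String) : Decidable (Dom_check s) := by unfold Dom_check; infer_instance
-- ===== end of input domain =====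

-- B replaces A's per-digit suffix scan with a single alnum pass plus one stop at the
-- first pre-last digit; proved to return the same Bool on every string.

-- ===== PORT A =====
-- check_for_mid_alphabets: Python returns True or (falsy) None; as a Bool.
def checkForMidAlphabets : List Char → Bool
  | [] => false
  | c :: rest => if PySem.Chars.isalpha c then true else checkForMidAlphabets rest

-- A's 'for i in range(2, len(s))' loop over the suffix s[i:]: at each step c = s[i],
-- rest = s[i+1:len(s)] (the slice A passes to check_for_mid_alphabets),
-- rest ≠ [] ↔ i < len(s) - 1, and count is A's accumulator.
def checkLoop : List Char → Nat → Bool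
  | [], _ => true
  | c :: rest, count =>
    if ¬ PySem.Chars.isalnum c then false
    else if rest ≠ [] then
      if PySem.Chars.isdigit c then
        -- count += 1, then the two tests on the incremented count
        if c = '0' ∧ count + 1 = 1 then false
        else if checkForMidAlphabets rest then false
        else checkLoop rest (count + 1)
      else checkLoop rest count
    else checkLoop rest count

def check (s : String) : Bool := checkLoop (s.toList.drop 2) 0

-- ===== PORT B =====
-- B's 'for i in range(2, n - 1)' loop over the suffix: the last character is not visited
def altLoop : List Char → Bool
  | [] => true
  | [_] => true
  | c :: rest =>
    if PySem.Chars.isdigit c then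
      if c = '0' then false
      else ! rest.any PySem.Chars.isalpha
    else altLoop rest

def check_alt (s : String) : Bool :=
  let t := s.toList.drop 2
  if t.all PySem.Chars.isalnum then altLoop t else false

-- ===== PRECONDITION & SPEC =====
def Spec_check (s : String) (out : Bool) : Prop := out = check_alt s
instance (s : String) (out : Bool) : Decidable (Spec_check s out) := by unfold Spec_check; infer_instance

-- ===== CLAIM (what is proved, stated in full; the proofs are below) =====
def Claim_equal_check : Prop := ∀ (s : String), Dom_check s → Spec_check s (check s)

-- ===== LEMMAS AND PROOFS =====

theorem checkForMid_eq_any (t : List Char) :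
    checkForMidAlphabets t = t.any PySem.Chars.isalpha := by
  induction t with
  | nil => rfl
  | cons c rest ih => simp [checkForMidAlphabets, List.any_cons, ih]

-- if A's loop returns true, every character it visited was alphanumeric
theorem checkLoop_true_all (t : List Char) :
    ∀ c, checkLoop t c = true → t.all PySem.Chars.isalnum = true := by
  induction t with
  | nil => intro c _; rfl
  | cons x rest ih =>
    intro c h
    rw [checkLoop] at h
    by_cases ha : PySem.Chars.isalnum x = true
    · rw [if_neg (by simp [ha])] at h
      simp only [List.all_cons, ha, Bool.true_and]
      split_ifs at h with h1 h2 h3 h4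
      · exact ih _ h
      · exact ih _ h
      · exact ih _ h
    · rw [if_pos (by simp [ha])] at h
      exact absurd h (by simp)

-- once a digit has been counted (count ≥ 1), A's loop succeeds on an
-- alphanumeric, letter-free suffix
theorem checkLoop_tail_true (t : List Char) :
    ∀ c, 1 ≤ c → t.all PySem.Chars.isalnum = true →
      t.any PySem.Chars.isalpha = false → checkLoop t c = true := by
  induction t with
  | nil => intro c _ _ _; rfl
  | cons x rest ih =>
    intro c hc hall hany
    simp only [List.all_cons, Bool.and_eq_true] at hall
    simp only [List.any_cons, Bool.or_eq_false_iff] at hany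
    rw [checkLoop, if_neg (by simp [hall.1])]
    have hrec : ∀ c', 1 ≤ c' → checkLoop rest c' = true :=
      fun c' hc' => ih c' hc' hall.2 hany.2
    split_ifs with h1 h2 h3 h4
    · omega
    · rw [checkForMid_eq_any, hany.2] at h4; exact absurd h4 (by simp)
    · exact hrec _ (by omega)
    · exact hrec _ hc
    · exact hrec _ hc

-- the core equivalence: A's loop with count = 0 equals B's "all alnum" test
-- combined with B's loop
theorem checkLoop_eq_alt (t : List Char) :
    checkLoop t 0 = (t.all PySem.Chars.isalnum && altLoop t) := by
  induction t with
  | nil => rfl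
  | cons x rest ih =>
    rw [checkLoop]
    by_cases ha : PySem.Chars.isalnum x = true
    · rw [if_neg (by simp [ha])]
      simp only [List.all_cons, ha, Bool.true_and]
      match rest, ih with
      | [], _ =>
        simp [altLoop, checkLoop]
      | y :: rs, ih =>
        rw [if_pos (by simp)]
        by_cases hd : PySem.Chars.isdigit x = true
        · rw [if_pos hd, altLoop.eq_def]
          simp only [hd, if_true]
          by_cases h0 : x = '0'
          · rw [if_pos ⟨h0, by norm_num⟩, if_pos h0]
            simp
          · rw [if_neg (by simp [h0]), if_neg h0, checkForMid_eq_any]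
            by_cases hany : (y :: rs).any PySem.Chars.isalpha = true
            · simp [hany]
            · rw [if_neg (by simp [hany]), Bool.eq_false_iff.mpr hany]
              simp only [Bool.not_false, Bool.and_true]
              by_cases hall : (y :: rs).all PySem.Chars.isalnum = true
              · rw [hall]
                exact checkLoop_tail_true _ 1 le_rfl hall (Bool.eq_false_iff.mpr hany)
              · rw [Bool.eq_false_iff.mpr hall]
                by_contra hne
                exact hall (checkLoop_true_all _ 1
                  (by revert hne; cases checkLoop (y :: rs) 1 <;> simp))
        · rw [if_neg hd, altLoop.eq_def]
          simp only [hd, Bool.false_eq_true, if_false]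
          exact ih
    · rw [if_pos (by simp [ha])]
      simp [Bool.eq_false_iff.mpr ha]

-- ===== VERDICT (by name: the statement is the Claim_ definition above) =====
theorem check_spec : Claim_equal_check := by
  intro s _
  unfold Spec_check check check_alt
  rw [checkLoop_eq_alt]
  cases h : ((s.toList.drop 2).all PySem.Chars.isalnum) <;> simp [h]
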